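-- pv_equiv track=rewrite | github.com/TDTU-K25/linear-algebra | MidTerm/2022/Source.py | req1
-- ===== SOURCE A (Python) =====
-- def req1(transactions):
--     bestSeller = []
--     worstSeller = []
--     listProduct = []
--
--     # Get all the products in table transactions
--     for i in range(0, len(transactions)):
--         for j in range(0, len(transactions[i][1])):
--             # Three-dimensional array
--             listProduct.append(transactions[i][1][j].strip())
--
--     # Sort list in ascending order
--     listProduct = sorted(listProduct)
--
--     # Remove duplicate value in listProduct
--     listProductAfterRemoveDuplicate = list(dict.fromkeys(listProduct))
--
--     # Count the number of times that each product is sold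
--     countTimesAppearInList = []
--     for i in range(0, len(listProductAfterRemoveDuplicate)):
--         count = 0
--         for j in range(0, len(listProduct)):
--             if (listProductAfterRemoveDuplicate[i] == listProduct[j]):
--                 count += 1
--         countTimesAppearInList.append(count)
--
--     # Group listProductAfterRemoveDuplicate and countTimesAppearInList
--     listProductWithTimeAppear = dict(
--         zip(listProductAfterRemoveDuplicate, countTimesAppearInList))
--
--     # Get max and min value from dict
--     maxValue = max(listProductWithTimeAppear.values())
--     minValue = min(listProductWithTimeAppear.values())
--
--     # Find products which are bestSeller and worstSeller
--     for key, value in listProductWithTimeAppear.items():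
--         if (value == maxValue):
--             bestSeller.append(key)
--         elif (value == minValue):
--             worstSeller.append(key)
--
--     return sorted(bestSeller), sorted(worstSeller)
-- ===== SOURCE B (Python) =====
-- def req1(transactions):
--     # Sort the stripped flat product list once, then find best/worst sellers in a
--     # SINGLE run-length scan over the sorted list, tracking the current max/min run
--     # on the fly -- no per-product rescans, no dict/counter at all.
--     products = sorted(p.strip() for _, items in transactions for p in items)
--
--     def runs(ps):
--         # run-length encode a sorted list
--         if not ps:
--             return []
--         out = []
--         cur, c = ps[0], 1
--         for p in ps[1:]:
--             if p == cur:
--                 c += 1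
--             else:
--                 out.append((cur, c))
--                 cur, c = p, 1
--         out.append((cur, c))
--         return out
--
--     best, worst = [], []
--     maxC, minC = 0, len(products) + 1
--     for key, run in runs(products):
--         if maxC < run:
--             maxC, best = run, [key]
--         elif run == maxC:
--             best.append(key)
--         if run < minC:
--             minC, worst = run, [key]
--         elif run == minC:
--             worst.append(key)
--     if maxC == minC:
--         worst = []
--     return best, worst
-- ===== Notes on version B (the rewrite author's own statement) =====
-- stated objective: faster
-- what changed: Replaces A's per-unique-product full rescans plus dict/filter/final-sort pipeline by one run-length scan over the sorted flat product list that tracks the current max/min run and the best/worst key lists on the fly (outputs come out already sorted; no dict at all).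
import Mathlib
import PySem

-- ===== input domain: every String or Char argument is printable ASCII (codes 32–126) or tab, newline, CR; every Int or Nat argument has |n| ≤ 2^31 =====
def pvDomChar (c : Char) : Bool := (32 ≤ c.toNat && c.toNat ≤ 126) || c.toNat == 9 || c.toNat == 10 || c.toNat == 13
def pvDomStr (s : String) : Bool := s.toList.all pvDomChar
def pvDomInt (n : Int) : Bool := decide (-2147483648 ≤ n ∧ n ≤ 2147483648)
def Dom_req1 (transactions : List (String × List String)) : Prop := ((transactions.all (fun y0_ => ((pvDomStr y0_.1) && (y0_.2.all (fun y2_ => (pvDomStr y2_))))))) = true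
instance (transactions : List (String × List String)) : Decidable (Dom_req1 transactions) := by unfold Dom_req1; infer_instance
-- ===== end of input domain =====

-- B sorts the flat product list once and finds best/worst sellers in a single run-length scan (objective: faster).

-- ===== PORT A =====
def req1 (transactions : List (String × List String)) : List String × List String :=
  let listProduct0 : List String :=
    (PySem.List.pyRange 0 (PySem.List.len transactions) 1).foldl (fun acc i =>
      (PySem.List.pyRange 0 (PySem.List.len (PySem.List.pyGetD transactions i ("", [])).2) 1).foldl
        (fun acc2 j =>
          acc2 ++ [PySem.Str.strip (PySem.List.pyGetD (PySem.List.pyGetD transactions i ("", [])).2 j "")]) acc) []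
  let listProduct := PySem.List.sorted listProduct0 (fun x => x) false
  let listProductAfterRemoveDuplicate := PySem.List.dedup listProduct
  let countTimesAppearInList : List Int :=
    (PySem.List.pyRange 0 (PySem.List.len listProductAfterRemoveDuplicate) 1).foldl (fun acc i =>
      let count :=
        (PySem.List.pyRange 0 (PySem.List.len listProduct) 1).foldl (fun c j =>
          if PySem.List.pyGetD listProductAfterRemoveDuplicate i "" == PySem.List.pyGetD listProduct j ""
          then c + 1 else c) (0 : Int)
      acc ++ [count]) []
  let listProductWithTimeAppear :=
    PySem.Dict.ofList (listProductAfterRemoveDuplicate.zip countTimesAppearInList)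
  match PySem.List.max? (PySem.Dict.values listProductWithTimeAppear) (fun v => v),
        PySem.List.min? (PySem.Dict.values listProductWithTimeAppear) (fun v => v) with
  | some maxValue, some minValue =>
    let bw := (PySem.Dict.items listProductWithTimeAppear).foldl
      (fun (bw : List String × List String) kv =>
        if kv.2 == maxValue then (bw.1 ++ [kv.1], bw.2)
        else if kv.2 == minValue then (bw.1, bw.2 ++ [kv.1])
        else bw) ([], [])
    (PySem.List.sorted bw.1 (fun x => x) false, PySem.List.sorted bw.2 (fun x => x) false)
  | _, _ => ([], [])   -- max()/min() of an empty dict: Python raises ValueError (excluded by Pre_req1)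

-- ===== PORT B =====
-- Source B's runs() loop state: current key x, current run length c, rest of the list
def pvRunsAux (x : String) (c : Int) : List String → List (String × Int)
  | [] => [(x, c)]
  | y :: ys => if y == x then pvRunsAux x (c + 1) ys else (x, c) :: pvRunsAux y 1 ys

-- Source B's runs(ps): run-length encoding of the (sorted) product list
def pvRuns : List String → List (String × Int)
  | [] => []
  | x :: xs => pvRunsAux x 1 xs

-- one iteration of Source B's 'for key, run in runs(products)' loop body
def pvStep (st : Int × List String × Int × List String) (kr : String × Int) :
    Int × List String × Int × List String :=
  let mb : Int × List String :=
    if st.1 < kr.2 then (kr.2, [kr.1])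
    else if kr.2 == st.1 then (st.1, st.2.1 ++ [kr.1]) else (st.1, st.2.1)
  let mw : Int × List String :=
    if kr.2 < st.2.2.1 then (kr.2, [kr.1])
    else if kr.2 == st.2.2.1 then (st.2.2.1, st.2.2.2 ++ [kr.1]) else (st.2.2.1, st.2.2.2)
  (mb.1, mb.2, mw.1, mw.2)

def req1_alt (transactions : List (String × List String)) : List String × List String :=
  let products := PySem.List.sorted (transactions.flatMap (fun t => t.2.map PySem.Str.strip)) (fun x => x) false
  let st := (pvRuns products).foldl pvStep (0, [], ((products.length : Int) + 1), [])
  if st.1 == st.2.2.1 then (st.2.1, []) else (st.2.1, st.2.2.2)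

-- ===== PRECONDITION & SPEC =====
-- Pre_ excludes exactly the inputs with no products at all, on which A raises ValueError (max() of an empty sequence).
def Pre_req1 (transactions : List (String × List String)) : Prop :=
  transactions.flatMap (fun t => t.2) ≠ []
instance (transactions : List (String × List String)) : Decidable (Pre_req1 transactions) := by unfold Pre_req1; infer_instance
def pvWitness_req1 : (List (String × List String)) :=
  [("t1", ["a", " b "]), ("t2", ["a"])]
def Spec_req1 (transactions : List (String × List String)) (out : List String × List String) : Prop := out = req1_alt transactions
instance (transactions : List (String × List String)) (out : List String × List String) : Decidable (Spec_req1 transactions out) := by unfold Spec_req1; infer_instance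

-- ===== CLAIM (what is proved, stated in full; the proofs are below) =====
def Claim_equal_req1 : Prop := ∀ (transactions : List (String × List String)), Dom_req1 transactions → Pre_req1 transactions → Spec_req1 transactions (req1 transactions)

-- ===== LEMMAS AND PROOFS =====

-- abbreviation used only by the proofs: the stripped, flattened product list
def pvFlat (transactions : List (String × List String)) : List String :=
  transactions.flatMap (fun t => t.2.map PySem.Str.strip)

-- A's index-driven flattening loop produces pvFlat
lemma pvFlatA (tx : List (String × List String)) :
    (PySem.List.pyRange 0 (PySem.List.len tx) 1).foldl (fun acc i =>
      (PySem.List.pyRange 0 (PySem.List.len (PySem.List.pyGetD tx i ("", [])).2) 1).foldl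
        (fun acc2 j =>
          acc2 ++ [PySem.Str.strip (PySem.List.pyGetD (PySem.List.pyGetD tx i ("", [])).2 j "")]) acc) []
    = pvFlat tx := by
  rw [PySem.List.foldl_pyRange_zero_pyGetD tx ("", [])
      (f := fun acc t => (PySem.List.pyRange 0 (PySem.List.len t.2) 1).foldl
        (fun acc2 j => acc2 ++ [PySem.Str.strip (PySem.List.pyGetD t.2 j "")]) acc)]
  simp only [PySem.List.foldl_pyRange_zero_pyGetD _ ""
      (f := fun acc2 p => acc2 ++ [PySem.Str.strip p])]
  simp only [PySem.List.foldl_append_singleton_eq_map]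
  rw [PySem.List.foldl_append_eq_flatMap]
  simp [pvFlat]

-- A's inner counting loop is List.count
lemma pvCountFold (v : String) (l : List String) : ∀ a : Int,
    l.foldl (fun c x => if v == x then c + 1 else c) a = a + (l.count v : Int) := by
  induction l with
  | nil => intro a; simp
  | cons h t ih =>
    intro a
    rw [List.foldl_cons]
    by_cases hb : (v == h) = true
    · rw [if_pos hb, ih]
      have hv : v = h := by simpa using hb
      subst hv
      rw [List.count_cons, if_pos hb]
      push_cast
      ring
    · rw [if_neg hb, ih]
      have hv : ¬ v = h := by simpa using hb
      simp [List.count_cons]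
      exact fun h' => hv h'.symm

lemma pvCountLoop (S : List String) (v : String) :
    (PySem.List.pyRange 0 (PySem.List.len S) 1).foldl
      (fun c j => if v == PySem.List.pyGetD S j "" then c + 1 else c) (0 : Int)
    = (S.count v : Int) := by
  rw [PySem.List.foldl_pyRange_zero_pyGetD S ""
      (f := fun c x => if v == x then c + 1 else c)]
  rw [pvCountFold]
  simp

-- A's outer counting loop is a map over the deduplicated list
lemma pvCountsA (D S : List String) :
    (PySem.List.pyRange 0 (PySem.List.len D) 1).foldl (fun acc i =>
      acc ++ [(PySem.List.pyRange 0 (PySem.List.len S) 1).foldl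
        (fun c j => if PySem.List.pyGetD D i "" == PySem.List.pyGetD S j "" then c + 1 else c) (0 : Int)]) []
    = D.map (fun k => (S.count k : Int)) := by
  simp only [pvCountLoop]
  rw [PySem.List.foldl_pyRange_zero_pyGetD D ""
      (f := fun acc k => acc ++ [(S.count k : Int)])]
  rw [PySem.List.foldl_append_singleton_eq_map, List.nil_append]

-- Dict.ofList of a pair list with pairwise-distinct keys stores exactly that list
lemma pvDictOfListItems {kappa nu : Type} [BEq kappa] [LawfulBEq kappa]
    (l : List (kappa × nu)) (h : (l.map Prod.fst).Nodup) :
    (PySem.Dict.ofList l).items = l := by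
  induction l using List.reverseRecOn with
  | nil => rfl
  | append_singleton l p ih =>
    have hh : (l.map Prod.fst).Nodup ∧ ∀ (a : kappa) (x : nu), (a, x) ∈ l → ¬ a = p.1 := by
      simpa [List.nodup_append] using h
    have h' := hh.1
    have hnm : p.1 ∉ l.map Prod.fst := by
      intro hm
      obtain ⟨q, hq, hq1⟩ := List.mem_map.mp hm
      exact hh.2 q.1 q.2 (by simpa using hq) hq1
    have hfold : PySem.Dict.ofList (l ++ [p])
        = (PySem.Dict.ofList l).insert p.1 p.2 := by
      show (l ++ [p]).foldl (fun d q => d.insert q.1 q.2) PySem.Dict.empty = _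
      rw [List.foldl_append]
      rfl
    have hkeys : (PySem.Dict.ofList l).keys = l.map Prod.fst := by
      show ((PySem.Dict.ofList l).items).map Prod.fst = _
      rw [ih h']
    have hc : (PySem.Dict.ofList l).contains p.1 = false := by
      by_contra hcc
      have : (PySem.Dict.ofList l).contains p.1 = true := by
        revert hcc; cases (PySem.Dict.ofList l).contains p.1 <;> simp
      exact hnm (hkeys ▸ (PySem.Dict.contains_iff_mem_keys _ _).mp this)
    rw [hfold, PySem.Dict.items_insert_of_not_contains _ _ hc, ih h']

-- A's best/worst accumulation loop is two filters
lemma pvBwFold (l : List (String × Int)) (maxV minV : Int) : ∀ (b w : List String),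
    l.foldl (fun (bw : List String × List String) kv =>
      if kv.2 == maxV then (bw.1 ++ [kv.1], bw.2)
      else if kv.2 == minV then (bw.1, bw.2 ++ [kv.1])
      else bw) (b, w)
    = (b ++ (l.filter (fun kv => kv.2 == maxV)).map (·.1),
       w ++ (l.filter (fun kv => !(kv.2 == maxV) && kv.2 == minV)).map (·.1)) := by
  induction l with
  | nil => intro b w; simp
  | cons kv t ih =>
    intro b w
    rw [List.foldl_cons, List.filter_cons, List.filter_cons]
    by_cases h1 : (kv.2 == maxV) = true
    · simp only [h1, Bool.not_true, Bool.false_and, ite_true]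
      rw [ih]
      simp
    · have hb1 : (kv.2 == maxV) = false := by simpa using h1
      by_cases h2 : (kv.2 == minV) = true
      · simp only [hb1, h2, Bool.not_false, Bool.true_and, Bool.false_eq_true, ite_true, ite_false]
        rw [ih]
        simp
      · have hb2 : (kv.2 == minV) = false := by simpa using h2
        simp only [hb1, hb2, Bool.not_false, Bool.true_and, Bool.false_eq_true, ite_false]
        rw [ih]

-- PySem.List.dedup peels one distinct head off
lemma pvDedupCons (x : String) (xs : List String) :
    PySem.List.dedup (x :: xs) = x :: (PySem.List.dedup xs).filter (fun y => !(y == x)) := by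
  simp [PySem.List.dedup_eq_ofList, PySem.Set.ofList_cons, PySem.Set.discard]

-- every key produced by the scan is the current key or comes from the rest of the list
lemma pvRunsAuxKeys (ys : List String) : ∀ (x : String) (c : Int) (p : String × Int),
    p ∈ pvRunsAux x c ys → p.1 = x ∨ p.1 ∈ ys := by
  induction ys with
  | nil =>
    intro x c p hp
    rw [pvRunsAux] at hp
    left
    rw [List.mem_singleton.mp hp]
  | cons y ys ih =>
    intro x c p hp
    rw [pvRunsAux] at hp
    by_cases hb : (y == x) = true
    · rw [if_pos hb] at hp
      rcases ih x (c + 1) p hp with h | h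
      · exact Or.inl h
      · exact Or.inr (List.mem_cons_of_mem _ h)
    · rw [if_neg hb] at hp
      rcases List.mem_cons.mp hp with h | h
      · left; rw [h]
      · rcases ih y 1 p h with h' | h'
        · exact Or.inr (by simp [h'])
        · exact Or.inr (List.mem_cons_of_mem _ h')

-- on a sorted list the scan's keys are strictly increasing
lemma pvRunsAuxPairwise (ys : List String) : ∀ (x : String) (c : Int),
    (x :: ys).Pairwise (· ≤ ·) →
    (pvRunsAux x c ys).Pairwise (fun p q => p.1 < q.1) := by
  induction ys with
  | nil => intro x c _; simp [pvRunsAux]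
  | cons y ys ih =>
    intro x c hs
    rw [List.pairwise_cons] at hs
    obtain ⟨hxall, hys⟩ := hs
    have hyall : ∀ z ∈ ys, y ≤ z := (List.pairwise_cons.mp hys).1
    rw [pvRunsAux]
    by_cases hb : (y == x) = true
    · rw [if_pos hb]
      have hyx : y = x := by simpa using hb
      subst hyx
      exact ih y (c + 1) hys
    · rw [if_neg hb]
      have hxy : x < y := by
        have hle : x ≤ y := hxall y (by simp)
        have hne : ¬ y = x := by simpa using hb
        exact lt_of_le_of_ne hle (fun h => hne h.symm)
      refine List.pairwise_cons.mpr ⟨?_, ih y 1 hys⟩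
      intro p hp
      rcases pvRunsAuxKeys ys y 1 p hp with h | h
      · rw [h]; exact hxy
      · exact lt_of_lt_of_le hxy (hyall p.1 h)

-- characterization of the scan on a sorted list: one pair per distinct value, with its count
lemma pvRunsAuxEq (ys : List String) : ∀ (x : String) (c : Int),
    (x :: ys).Pairwise (· ≤ ·) →
    pvRunsAux x c ys
      = (x, c + (ys.count x : Int))
        :: ((PySem.List.dedup ys).filter (fun y => !(y == x))).map
             (fun k => (k, (ys.count k : Int))) := by
  induction ys with
  | nil => intro x c _; simp [pvRunsAux, PySem.List.dedup]
  | cons y ys ih =>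
    intro x c hs
    rw [List.pairwise_cons] at hs
    obtain ⟨hxall, hys⟩ := hs
    have hyall : ∀ z ∈ ys, y ≤ z := (List.pairwise_cons.mp hys).1
    rw [pvRunsAux]
    by_cases hb : (y == x) = true
    · rw [if_pos hb]
      have hyx : y = x := by simpa using hb
      subst hyx
      rw [ih y (c + 1) hys]
      rw [pvDedupCons]
      rw [List.filter_cons_of_neg (by simp)]
      rw [List.filter_filter]
      have hcong : ∀ a ∈ PySem.List.dedup ys, ((!(a == y)) && !(a == y)) = (!(a == y)) := by
        intro a _
        cases a == y <;> simp
      rw [List.filter_congr hcong]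
      have hhead : c + 1 + (ys.count y : Int) = c + ((y :: ys).count y : Int) := by
        rw [List.count_cons_self]
        push_cast
        ring
      have htail : List.map (fun k => (k, (ys.count k : Int)))
            ((PySem.List.dedup ys).filter (fun a => !(a == y)))
          = List.map (fun k => (k, (((y :: ys).count k : Int))))
            ((PySem.List.dedup ys).filter (fun a => !(a == y))) := by
        apply List.map_congr_left
        intro k hk
        rcases List.mem_filter.mp hk with ⟨_, hky⟩
        have hkne : k ≠ y := by simpa using hky
        rw [List.count_cons_of_ne (Ne.symm hkne)]
      rw [hhead, htail]
    · rw [if_neg hb]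
      have hne : ¬ y = x := by simpa using hb
      have hxy : x < y := lt_of_le_of_ne (hxall y (by simp)) (fun h => hne h.symm)
      have hxnot : x ∉ y :: ys := by
        intro hmem
        rcases List.mem_cons.mp hmem with h | h
        · exact absurd h.symm hne
        · exact absurd (hyall x h) (not_le.mpr hxy)
      rw [ih y 1 hys]
      rw [pvDedupCons]
      rw [List.filter_cons_of_pos (by simpa using fun h => hne h)]
      rw [List.filter_filter]
      have hcong : ∀ a ∈ PySem.List.dedup ys, ((!(a == x)) && !(a == y)) = (!(a == y)) := by
        intro a ha
        have haym : a ∈ ys := (PySem.List.mem_dedup ys a).mp ha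
        have hax : ¬ a = x := by
          intro h
          exact hxnot (h ▸ List.mem_cons_of_mem _ haym)
        simp [hax]
      rw [List.filter_congr hcong]
      have hcx : ((y :: ys).count x : Int) = 0 := by
        rw [List.count_eq_zero_of_not_mem hxnot]
        simp
      rw [hcx, add_zero, List.map_cons]
      have hhead : ((1 : Int) + (ys.count y : Int)) = (((y :: ys).count y : Int)) := by
        rw [List.count_cons_self]
        push_cast
        ring
      have htail : List.map (fun k => (k, (ys.count k : Int)))
            ((PySem.List.dedup ys).filter (fun a => !(a == y)))
          = List.map (fun k => (k, (((y :: ys).count k : Int))))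
            ((PySem.List.dedup ys).filter (fun a => !(a == y))) := by
        apply List.map_congr_left
        intro k hk
        rcases List.mem_filter.mp hk with ⟨_, hky⟩
        have hkne : k ≠ y := by simpa using hky
        rw [List.count_cons_of_ne (Ne.symm hkne)]
      rw [hhead, htail]

-- run-length encoding of a sorted list = its dedup paired with counts
lemma pvRunsEq (S : List String) (h : S.Pairwise (· ≤ ·)) :
    pvRuns S = (PySem.List.dedup S).map (fun k => (k, (S.count k : Int))) := by
  cases S with
  | nil => simp [pvRuns, PySem.List.dedup]
  | cons x xs =>
    rw [pvRuns, pvRunsAuxEq xs x 1 h, pvDedupCons, List.map_cons]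
    have hhead : ((1 : Int) + (xs.count x : Int)) = (((x :: xs).count x : Int)) := by
      rw [List.count_cons_self]
      push_cast
      ring
    have htail : List.map (fun k => (k, (xs.count k : Int)))
          ((PySem.List.dedup xs).filter (fun a => !(a == x)))
        = List.map (fun k => (k, (((x :: xs).count k : Int))))
          ((PySem.List.dedup xs).filter (fun a => !(a == x))) := by
      apply List.map_congr_left
      intro k hk
      rcases List.mem_filter.mp hk with ⟨_, hkx⟩
      have hkne : k ≠ x := by simpa using hkx
      rw [List.count_cons_of_ne (Ne.symm hkne)]
    rw [hhead, htail]

-- B's accumulation loop computes max/min and the key lists with those counts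
lemma pvFoldCanon : ∀ (l : List (String × Int)) (m0 n0 : Int) (b0 w0 : List String) (M m : Int),
    l ≠ [] →
    (∀ kr ∈ l, m0 < kr.2 ∧ kr.2 < n0) →
    PySem.List.max? (l.map (·.2)) (fun v => v) = some M →
    PySem.List.min? (l.map (·.2)) (fun v => v) = some m →
    l.foldl pvStep (m0, b0, n0, w0)
      = (M, (l.filter (fun kv => kv.2 == M)).map (·.1), m,
         (l.filter (fun kv => kv.2 == m)).map (·.1)) := by
  intro l
  induction l using List.reverseRecOn with
  | nil => intro _ _ _ _ _ _ hne _ _ _; exact absurd rfl hne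
  | append_singleton l kr ih =>
    intro m0 n0 b0 w0 M m _ hbd hM hm
    rw [List.foldl_append, List.foldl_cons, List.foldl_nil]
    cases l with
    | nil =>
      simp only [List.foldl_nil]
      have hb := hbd kr (by simp)
      have hMv : M = kr.2 := by
        rw [List.nil_append, List.map_cons, List.map_nil, PySem.List.max?_id_cons] at hM
        simpa using hM.symm
      have hmv : m = kr.2 := by
        rw [List.nil_append, List.map_cons, List.map_nil, PySem.List.min?_id_cons] at hm
        simpa using hm.symm
      subst hMv hmv
      simp only [pvStep]
      rw [if_pos hb.1, if_pos hb.2]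
      simp
    | cons p l' =>
      set L := p :: l' with hL
      have hLne : L ≠ [] := by simp [hL]
      obtain ⟨M', hM'⟩ : ∃ M', PySem.List.max? (L.map (·.2)) (fun v => v) = some M' := by
        cases hc : PySem.List.max? (L.map (·.2)) (fun v => v) with
        | none => exact absurd ((PySem.List.max?_eq_none_iff _ _).mp hc) (by simp [hL])
        | some v => exact ⟨v, rfl⟩
      obtain ⟨m', hm'⟩ : ∃ m', PySem.List.min? (L.map (·.2)) (fun v => v) = some m' := by
        cases hc : PySem.List.min? (L.map (·.2)) (fun v => v) with
        | none => exact absurd ((PySem.List.min?_eq_none_iff _ _).mp hc) (by simp [hL])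
        | some v => exact ⟨v, rfl⟩
      rw [ih m0 n0 b0 w0 M' m' hLne (fun q hq => hbd q (List.mem_append_left _ hq)) hM' hm']
      -- relate M to M' and kr.2
      have hMval : M = max M' kr.2 := by
        rw [hL, List.map_cons, PySem.List.max?_id_cons] at hM'
        rw [List.map_append, hL, List.map_cons, List.cons_append, PySem.List.max?_id_cons,
            List.foldl_append] at hM
        simp only [List.map_cons, List.map_nil, List.foldl_cons, List.foldl_nil] at hM
        have h' : List.foldl max p.2 (List.map (fun x => x.2) l') = M' := by simpa using hM'
        rw [h'] at hM
        simpa using hM.symm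
      have hmval : m = min m' kr.2 := by
        rw [hL, List.map_cons, PySem.List.min?_id_cons] at hm'
        rw [List.map_append, hL, List.map_cons, List.cons_append, PySem.List.min?_id_cons,
            List.foldl_append] at hm
        simp only [List.map_cons, List.map_nil, List.foldl_cons, List.foldl_nil] at hm
        have h' : List.foldl min p.2 (List.map (fun x => x.2) l') = m' := by simpa using hm'
        rw [h'] at hm
        simpa using hm.symm
      have hleM' : ∀ q ∈ L, q.2 ≤ M' := by
        intro q hq
        exact PySem.List.max?_isMax hM' q.2 (List.mem_map_of_mem hq)
      have hgem' : ∀ q ∈ L, m' ≤ q.2 := by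
        intro q hq
        exact PySem.List.min?_isMin hm' q.2 (List.mem_map_of_mem hq)
      simp only [pvStep]
      -- best component
      have hbest :
          (if M' < kr.2 then (kr.2, [kr.1])
           else if kr.2 == M' then (M', ((L.filter (fun kv => kv.2 == M')).map (·.1)) ++ [kr.1])
           else (M', (L.filter (fun kv => kv.2 == M')).map (·.1)))
          = (M, ((L ++ [kr]).filter (fun kv => kv.2 == M)).map (·.1)) := by
        rcases lt_trichotomy M' kr.2 with hlt | heq | hgt
        · rw [if_pos hlt]
          have hMk : M = kr.2 := by rw [hMval, max_eq_right (le_of_lt hlt)]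
          rw [hMk]
          have hfl : L.filter (fun kv => kv.2 == kr.2) = [] := by
            apply List.filter_eq_nil_iff.mpr
            intro q hq
            have := hleM' q hq
            simp only [beq_iff_eq]
            omega
          have hfr : [kr].filter (fun kv => kv.2 == kr.2) = [kr] := by simp
          rw [List.filter_append, hfl, hfr]
          simp
        · rw [if_neg (by omega), if_pos (by simp [heq])]
          have hMk : M = M' := by rw [hMval, ← heq, max_self]
          rw [hMk]
          have hfr : [kr].filter (fun kv => kv.2 == M') = [kr] := by simp [heq]
          rw [List.filter_append, hfr, List.map_append]
          simp
        · rw [if_neg (by omega), if_neg (by simp; omega)]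
          have hMk : M = M' := by rw [hMval, max_eq_left (le_of_lt hgt)]
          rw [hMk]
          have hfr : [kr].filter (fun kv => kv.2 == M') = [] := by
            simp only [List.filter_cons, List.filter_nil]
            rw [if_neg (by simp; omega)]
          rw [List.filter_append, hfr, List.append_nil]
      -- worst component
      have hworst :
          (if kr.2 < m' then (kr.2, [kr.1])
           else if kr.2 == m' then (m', ((L.filter (fun kv => kv.2 == m')).map (·.1)) ++ [kr.1])
           else (m', (L.filter (fun kv => kv.2 == m')).map (·.1)))
          = (m, ((L ++ [kr]).filter (fun kv => kv.2 == m)).map (·.1)) := by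
        rcases lt_trichotomy kr.2 m' with hlt | heq | hgt
        · rw [if_pos hlt]
          have hmk : m = kr.2 := by rw [hmval, min_eq_right (le_of_lt hlt)]
          rw [hmk]
          have hfl : L.filter (fun kv => kv.2 == kr.2) = [] := by
            apply List.filter_eq_nil_iff.mpr
            intro q hq
            have := hgem' q hq
            simp only [beq_iff_eq]
            omega
          have hfr : [kr].filter (fun kv => kv.2 == kr.2) = [kr] := by simp
          rw [List.filter_append, hfl, hfr]
          simp
        · rw [if_neg (by omega), if_pos (by simp [heq])]
          have hmk : m = m' := by rw [hmval, heq, min_self]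
          rw [hmk]
          have hfr : [kr].filter (fun kv => kv.2 == m') = [kr] := by simp [heq]
          rw [List.filter_append, hfr, List.map_append]
          simp
        · rw [if_neg (by omega), if_neg (by simp; omega)]
          have hmk : m = m' := by rw [hmval, min_eq_left (le_of_lt hgt)]
          rw [hmk]
          have hfr : [kr].filter (fun kv => kv.2 == m') = [] := by
            simp only [List.filter_cons, List.filter_nil]
            rw [if_neg (by simp; omega)]
          rw [List.filter_append, hfr, List.append_nil]
      rw [hbest, hworst]

-- ===== VERDICT (by name: the statement is the Claim_ definition above) =====
-- D = dedup of the sorted list is strictly increasing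
lemma pvDedupPairwise (S : List String) (h : S.Pairwise (· ≤ ·)) :
    (PySem.List.dedup S).Pairwise (· < ·) := by
  cases S with
  | nil => simp [PySem.List.dedup]
  | cons x xs =>
    have hp := pvRunsAuxPairwise xs x 1 h
    rw [show pvRunsAux x 1 xs = pvRuns (x :: xs) from rfl, pvRunsEq (x :: xs) h] at hp
    rw [List.pairwise_map] at hp
    exact hp

-- zipping a list with a map over itself
lemma pvZipMap (l : List String) (f : String → Int) :
    l.zip (l.map f) = l.map (fun k => (k, f k)) := by
  induction l with
  | nil => rfl
  | cons h t ih => simp [ih]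

theorem req1_spec : Claim_equal_req1 := by
  intro tx _ hpre
  show req1 tx = req1_alt tx
  unfold req1 req1_alt
  dsimp only []
  rw [pvFlatA]
  rw [show List.flatMap (fun t : String × List String => t.2.map PySem.Str.strip) tx = pvFlat tx from rfl]
  set F := pvFlat tx with hFdef
  have hFne : F ≠ [] := by
    rw [hFdef]
    unfold pvFlat
    intro h
    apply hpre
    simp only [List.flatMap_eq_nil_iff, List.map_eq_nil_iff] at h ⊢
    exact h
  set S := PySem.List.sorted F (fun x => x) false with hSdef
  have hSp : S.Pairwise (· ≤ ·) := PySem.List.sorted_pairwise F (fun x => x)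
  have hSne : S ≠ [] := by
    intro h
    exact hFne ((PySem.List.sorted_eq_nil_iff F (fun x => x) false).mp h)
  set D := PySem.List.dedup S with hDdef
  have hDne : D ≠ [] := by
    intro h
    cases hS : S with
    | nil => exact hSne hS
    | cons x xs =>
      have : x ∈ D := by
        rw [hDdef, hS]
        exact (PySem.List.mem_dedup _ _).mpr (by simp)
      rw [h] at this
      exact absurd this (List.not_mem_nil)
  set g : String → String × Int := fun k => (k, (S.count k : Int)) with hgdef
  -- A's counting loop and dict
  rw [pvCountsA, pvZipMap]
  have hnodupD : D.Nodup := PySem.List.nodup_dedup S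
  have hitems : (PySem.Dict.ofList (D.map (fun k => (k, (S.count k : Int))))).items
      = D.map g := by
    apply pvDictOfListItems
    have hD : (D.map (fun k => (k, (S.count k : Int)))).map Prod.fst = D := by
      simp [Function.comp_def]
    rw [hD]
    exact hnodupD
  have hvals : ∀ (d : PySem.Dict String Int), PySem.Dict.values d = (PySem.Dict.items d).map (·.2) :=
    fun d => rfl
  rw [hvals, hitems]
  -- B's runs
  rw [pvRunsEq S hSp, ← hgdef]
  set l := D.map g with hldef
  have hlne : l ≠ [] := by
    rw [hldef]
    intro h
    exact hDne (List.map_eq_nil_iff.mp h)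
  -- max and min exist
  obtain ⟨M, hM⟩ : ∃ M, PySem.List.max? (l.map (·.2)) (fun v => v) = some M := by
    cases hc : PySem.List.max? (l.map (·.2)) (fun v => v) with
    | none => exact absurd (List.map_eq_nil_iff.mp ((PySem.List.max?_eq_none_iff _ _).mp hc)) hlne
    | some v => exact ⟨v, rfl⟩
  obtain ⟨m, hm⟩ : ∃ m, PySem.List.min? (l.map (·.2)) (fun v => v) = some m := by
    cases hc : PySem.List.min? (l.map (·.2)) (fun v => v) with
    | none => exact absurd (List.map_eq_nil_iff.mp ((PySem.List.min?_eq_none_iff _ _).mp hc)) hlne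
    | some v => exact ⟨v, rfl⟩
  rw [hM, hm]
  -- B's fold
  have hbnd : ∀ kr ∈ l, (0 : Int) < kr.2 ∧ kr.2 < (S.length : Int) + 1 := by
    intro kr hkr
    rw [hldef] at hkr
    obtain ⟨k, hk, hkeq⟩ := List.mem_map.mp hkr
    have hkS : k ∈ S := (PySem.List.mem_dedup S k).mp hk
    have h1 : 0 < S.count k := List.count_pos_iff.mpr hkS
    have h2 : S.count k ≤ S.length := List.count_le_length
    have hkeq2 : kr.2 = (S.count k : Int) := by rw [← hkeq]
    rw [hkeq2]
    constructor
    · exact_mod_cast h1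
    · have h2' : (S.count k : Int) ≤ (S.length : Int) := by exact_mod_cast h2
      omega
  rw [pvFoldCanon l 0 ((S.length : Int) + 1) [] [] M m hlne hbnd hM hm]
  -- A's best/worst loop
  dsimp only []
  rw [pvBwFold]
  simp only [List.nil_append]
  -- extremal facts
  have hle : ∀ q ∈ l, q.2 ≤ M := fun q hq => PySem.List.max?_isMax hM q.2 (List.mem_map_of_mem hq)
  have hge : ∀ q ∈ l, m ≤ q.2 := fun q hq => PySem.List.min?_isMin hm q.2 (List.mem_map_of_mem hq)
  -- filtered key lists are sorted already
  have hDlt : D.Pairwise (· < ·) := pvDedupPairwise S hSp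
  have hfil : ∀ v : Int, (l.filter (fun kv => kv.2 == v)).map (·.1)
      = D.filter (fun k => (S.count k : Int) == v) := by
    intro v
    rw [hldef, List.filter_map, List.map_map]
    have : ((fun x : String × Int => x.1) ∘ g) = id := by
      funext k
      rw [hgdef]
      rfl
    rw [this, List.map_id]
    rfl
  have hsorted : ∀ v : Int, PySem.List.sorted ((l.filter (fun kv => kv.2 == v)).map (·.1)) (fun x => x) false
      = (l.filter (fun kv => kv.2 == v)).map (·.1) := by
    intro v
    apply PySem.List.sorted_eq_self_of_pairwise
    rw [hfil v]
    exact ((hDlt.filter _).imp (fun h => le_of_lt h))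
  by_cases hMm : M = m
  · -- all counts equal: A's elif never fires, B empties worst
    rw [if_pos (by simp [hMm])]
    have hwnil : l.filter (fun kv => !(kv.2 == M) && kv.2 == m) = [] := by
      apply List.filter_eq_nil_iff.mpr
      intro q hq
      have h1 := hle q hq
      have h2 := hge q hq
      have : q.2 = M := by omega
      simp [this]
    rw [hwnil]
    rw [hsorted M]
    rfl
  · rw [if_neg (by simp [hMm])]
    have hwcong : l.filter (fun kv => !(kv.2 == M) && kv.2 == m)
        = l.filter (fun kv => kv.2 == m) := by
      apply List.filter_congr
      intro kv _
      by_cases h : (kv.2 == m) = true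
      · have : kv.2 = m := by simpa using h
        have hne : ¬ (kv.2 == M) = true := by
          simp only [this, beq_iff_eq]
          exact fun hh => hMm hh.symm
        simp [h, hne]
      · simp [h]
    rw [hwcong, hsorted M, hsorted m]
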